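-- pv_equiv track=rewrite | github.com/luisgc93/ds_and_algorithms | algorithms/poker_hands.py | highest_value_in_pair
-- ===== SOURCE A (Python) =====
-- from collections import Counter
-- from typing import List
--
-- CARD_TO_SCORE = {
--     "1": 1,
--     "2": 2,
--     "3": 3,
--     "4": 4,
--     "5": 5,
--     "6": 6,
--     "7": 7,
--     "8": 8,
--     "9": 9,
--     "T": 10,
--     "J": 11,
--     "Q": 12,
--     "K": 13,
--     "A": 14,
-- }
--
-- def highest_value_in_pair(values: List[str]) -> int:
--     if number_of_pairs(values) == 0:
--         raise ValueError("No pair found")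
--     repeated = (Counter(values) - Counter(set(values))).keys()
--     highest = 0
--     for card in repeated:
--         if CARD_TO_SCORE[card] > highest:
--             highest = CARD_TO_SCORE[card]
--     return highest
--
-- def number_of_pairs(values: List[str]) -> int:
--     count = Counter(values) - Counter(set(values))
--     pairs = 0
--     for i in count:
--         if count[i] == 1:
--             pairs += 1
--     return pairs
-- ===== SOURCE B (Python) =====
-- from typing import List
--
-- CARD_TO_SCORE = {
--     "1": 1, "2": 2, "3": 3, "4": 4, "5": 5, "6": 6, "7": 7, "8": 8,
--     "9": 9, "T": 10, "J": 11, "Q": 12, "K": 13, "A": 14,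
-- }
--
--
-- def highest_value_in_pair(values: List[str]) -> int:
--     # Sort a copy and scan runs of equal cards once: track whether any run has
--     # length exactly 2 (the pair guard) and the best score among runs >= 2.
--     s = sorted(values)
--     has_pair = False
--     best = 0
--     i, n = 0, len(s)
--     while i < n:
--         j = i + 1
--         while j < n and s[j] == s[i]:
--             j += 1
--         run = j - i
--         if run == 2:
--             has_pair = True
--         if run >= 2:
--             sc = CARD_TO_SCORE[s[i]]
--             if sc > best:
--                 best = sc
--         i = j
--     if not has_pair:
--         raise ValueError("No pair found")
--     return best
-- ===== Notes on version B (the rewrite author's own statement) =====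
-- stated objective: alternative
-- what changed: Replaces A's Counter-minus-Counter(set) subtraction plus a redundant number_of_pairs recomputation with a single sort of a copy and one scan over runs of equal cards, tracking the exactly-2 flag and the best score of runs >= 2 in the same pass.
import Mathlib
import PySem

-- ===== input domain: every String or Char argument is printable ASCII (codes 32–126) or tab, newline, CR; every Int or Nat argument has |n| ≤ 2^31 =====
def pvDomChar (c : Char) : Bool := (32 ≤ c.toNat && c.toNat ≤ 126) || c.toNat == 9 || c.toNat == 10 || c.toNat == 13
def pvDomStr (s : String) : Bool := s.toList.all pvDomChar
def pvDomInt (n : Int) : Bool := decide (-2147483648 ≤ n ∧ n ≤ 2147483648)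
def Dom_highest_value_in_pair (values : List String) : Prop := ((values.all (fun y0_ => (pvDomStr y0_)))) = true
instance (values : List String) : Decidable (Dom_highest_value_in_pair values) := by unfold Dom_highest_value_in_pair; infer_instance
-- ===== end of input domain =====

-- B replaces A's Counter-subtraction (plus a redundant number_of_pairs recompute) by one
-- sort-and-scan over runs of equal cards; objective: alternative decomposition, same cost class.


-- ===== PORT A =====
def CARD_TO_SCORE : PySem.Dict String Int :=
  ⟨[("1", 1), ("2", 2), ("3", 3), ("4", 4), ("5", 5), ("6", 6), ("7", 7), ("8", 8),
    ("9", 9), ("T", 10), ("J", 11), ("Q", 12), ("K", 13), ("A", 14)]⟩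

-- Counter(values) - Counter(set(values)): every distinct key loses 1, only positive counts survive
def counterSub (values : List String) : PySem.Dict String Int :=
  ⟨(PySem.Dict.counter values).items.filterMap
     (fun kc => if 0 < kc.2 - 1 then some (kc.1, kc.2 - 1) else none)⟩

def number_of_pairs (values : List String) : Int :=
  let count := counterSub values
  count.keys.foldl (fun pairs i => if count.getD i 0 == 1 then pairs + 1 else pairs) 0

def highest_value_in_pair (values : List String) : Int :=
  if number_of_pairs values == 0 then 0   -- Python: raise ValueError("No pair found"); excluded by Pre_
  else
    let repeated := (counterSub values).keys
    -- CARD_TO_SCORE[card]: a repeated card outside the table is a KeyError, excluded by Pre_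
    repeated.foldl (fun highest card =>
      if CARD_TO_SCORE.getD card 0 > highest then CARD_TO_SCORE.getD card 0 else highest) 0

-- ===== PORT B =====
-- the outer while loop of Source B: consume one run of equal cards per step
def scan_runs (s : List String) (has_pair : Bool) (best : Int) : Bool × Int :=
  match s with
  | [] => (has_pair, best)
  | v :: rest =>
    let run : Int := 1 + (rest.takeWhile (· == v)).length   -- the inner while loop
    let rest' := rest.dropWhile (· == v)
    let has_pair' := if run == 2 then true else has_pair
    let best' :=
      if 2 ≤ run then
        let sc := CARD_TO_SCORE.getD v 0   -- CARD_TO_SCORE[s[i]]: KeyError excluded by Pre_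
        if sc > best then sc else best
      else best
    scan_runs rest' has_pair' best'
termination_by s.length
decreasing_by
  simp only [List.length_cons]
  exact Nat.lt_succ_of_le (List.length_dropWhile_le _ _)

def highest_value_in_pair_alt (values : List String) : Int :=
  let s := PySem.List.sorted values (fun x => x)
  let r := scan_runs s false 0
  if !r.1 then 0 else r.2   -- Python: raise ValueError("No pair found"); excluded by Pre_

-- ===== PRECONDITION & SPEC =====
-- Pre_ is exactly where the Python A returns: some card occurs exactly twice (else ValueError),
-- and every card occurring at least twice is a key of CARD_TO_SCORE (else KeyError).
def Pre_highest_value_in_pair (values : List String) : Prop :=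
  (∃ v ∈ values, values.count v = 2) ∧
  ∀ v ∈ values, 2 ≤ values.count v →
    v ∈ (["1","2","3","4","5","6","7","8","9","T","J","Q","K","A"] : List String)
instance (values : List String) : Decidable (Pre_highest_value_in_pair values) := by
  unfold Pre_highest_value_in_pair; infer_instance

def pvWitness_highest_value_in_pair : List String := ["A", "A", "3"]

def Spec_highest_value_in_pair (values : List String) (out : Int) : Prop := out = highest_value_in_pair_alt values
instance (values : List String) (out : Int) : Decidable (Spec_highest_value_in_pair values out) := by unfold Spec_highest_value_in_pair; infer_instance

-- ===== CLAIM (what is proved, stated in full; the proofs are below) =====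
def Claim_equal_highest_value_in_pair : Prop := ∀ (values : List String), Dom_highest_value_in_pair values → Pre_highest_value_in_pair values → Spec_highest_value_in_pair values (highest_value_in_pair values)

-- ===== LEMMAS AND PROOFS =====

-- score of a card, and the max-accumulating step both folds use
def score (k : String) : Int := CARD_TO_SCORE.getD k 0
def mstep (h : Int) (k : String) : Int := if score k > h then score k else h

-- the repeated cards as A sees them: distinct values (first occurrence) with count ≥ 2
def repsA (l : List String) : List String :=
  (PySem.Set.ofList l).filter (fun v => decide (0 < (l.count v : Int) - 1))

-- the repeated cards as B sees them: one representative per run of length ≥ 2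
def repsS : List String → List String
  | [] => []
  | v :: rest =>
    (if 2 ≤ 1 + ((rest.takeWhile (· == v)).length : Int) then [v] else []) ++
      repsS (rest.dropWhile (· == v))
termination_by s => s.length
decreasing_by
  simp only [List.length_cons]
  exact Nat.lt_succ_of_le (List.length_dropWhile_le _ _)

def hasR2 : List String → Bool
  | [] => false
  | v :: rest =>
    (1 + ((rest.takeWhile (· == v)).length : Int) == 2) || hasR2 (rest.dropWhile (· == v))
termination_by s => s.length
decreasing_by
  simp only [List.length_cons]
  exact Nat.lt_succ_of_le (List.length_dropWhile_le _ _)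

theorem mstep_rcomm : ∀ (b : Int) (a1 a2 : String), mstep (mstep b a1) a2 = mstep (mstep b a2) a1 := by
  intro b a1 a2
  simp only [mstep]
  split_ifs <;> omega

theorem filterMap_if_eq_map_filter (l : List String) (p : String → Bool) (g : String → String × Int) :
    l.filterMap (fun k => if p k then some (g k) else none) = (l.filter p).map g := by
  induction l with
  | nil => rfl
  | cons x xs ih =>
    by_cases h : p x = true <;> simp [h, ih]

theorem counterSub_items (values : List String) :
    (counterSub values).items =
      (repsA values).map (fun k => (k, (values.count k : Int) - 1)) := by
  simp only [counterSub, PySem.Dict.items_counter, List.filterMap_map, repsA]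
  rw [← filterMap_if_eq_map_filter (PySem.Set.ofList values)
        (fun v => decide (0 < (values.count v : Int) - 1))
        (fun k => (k, (values.count k : Int) - 1))]
  apply List.filterMap_congr
  intro k _
  simp only [Function.comp]
  simp

theorem counterSub_keys (values : List String) :
    (counterSub values).keys = repsA values := by
  simp only [PySem.Dict.keys, counterSub_items values, List.map_map]
  simp [Function.comp_def]

theorem repsA_nodup (l : List String) : (repsA l).Nodup :=
  (PySem.Set.nodup_ofList l).filter _

theorem mem_repsA (l : List String) (w : String) :
    w ∈ repsA l ↔ w ∈ l ∧ 2 ≤ l.count w := by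
  simp only [repsA, List.mem_filter, PySem.Set.mem_ofList, decide_eq_true_eq]
  constructor
  · rintro ⟨h1, h2⟩; exact ⟨h1, by omega⟩
  · rintro ⟨h1, h2⟩; exact ⟨h1, by omega⟩

theorem getD_map_self (m : List String) (f : String → Int) (k : String) (d : Int)
    (hk : k ∈ m) :
    (PySem.Dict.mk (m.map fun k => (k, f k))).getD k d = f k := by
  induction m with
  | nil => cases hk
  | cons x xs ih =>
    simp only [PySem.Dict.getD, PySem.Dict.get?, List.map_cons, List.find?_cons]
    by_cases h : x = k
    · simp [h]
    · have hxk : (x == k) = false := by simp [h]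
      simp only [hxk]
      have hk' : k ∈ xs := by
        rcases List.mem_cons.mp hk with h' | h'
        · exact absurd h'.symm h
        · exact h'
      simpa [PySem.Dict.getD, PySem.Dict.get?] using ih hk'

theorem number_of_pairs_eq (values : List String) :
    number_of_pairs values =
      ((repsA values).countP (fun v => (values.count v : Int) - 1 == 1) : Int) := by
  simp only [number_of_pairs, counterSub_keys]
  rw [PySem.List.foldl_congr_mem _ _
        (fun pairs v => if ((values.count v : Int) - 1 == 1) = true then pairs + 1 else pairs) _
        ?_]
  · rw [PySem.List.foldl_count_if]; ring
  · intro acc x hx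
    have : (counterSub values).getD x 0 = (values.count x : Int) - 1 := by
      rw [show counterSub values = PySem.Dict.mk ((repsA values).map
            (fun k => (k, (values.count k : Int) - 1))) from
          congrArg PySem.Dict.mk (counterSub_items values)]
      exact getD_map_self _ _ _ _ hx
    simp [this]

theorem number_of_pairs_ne_zero (values : List String)
    (h : ∃ v ∈ values, values.count v = 2) : number_of_pairs values ≠ 0 := by
  rw [number_of_pairs_eq]
  obtain ⟨v, hv, hc⟩ := h
  have hmem : v ∈ repsA values := (mem_repsA values v).mpr ⟨hv, by omega⟩
  have : 0 < (repsA values).countP (fun v => (values.count v : Int) - 1 == 1) := by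
    rw [List.countP_pos_iff]
    exact ⟨v, hmem, by simp [hc]⟩
  omega

theorem A_eq_fold (values : List String) (h : number_of_pairs values ≠ 0) :
    highest_value_in_pair values = List.foldl mstep 0 (repsA values) := by
  have hb : (number_of_pairs values == 0) = false := by simpa using h
  simp only [highest_value_in_pair, hb, Bool.false_eq_true, if_false, counterSub_keys]
  rfl

theorem scan_spec (s : List String) (hp : Bool) (best : Int) :
    scan_runs s hp best = (hp || hasR2 s, List.foldl mstep best (repsS s)) := by
  induction s using repsS.induct generalizing hp best with
  | case1 => simp [scan_runs, hasR2, repsS]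
  | case2 v rest ih =>
    rw [scan_runs, ih]
    simp only [hasR2, repsS, Prod.mk.injEq]
    refine ⟨?_, ?_⟩
    · cases hp <;> by_cases h2 : (1 + ((rest.takeWhile (· == v)).length : Int) == 2) = true <;>
        simp_all
    · rw [List.foldl_append]
      congr 1
      by_cases h2 : (2 : Int) ≤ 1 + ((rest.takeWhile (· == v)).length : Int)
      · simp [h2, mstep, score]
      · simp [h2]

-- run decomposition facts for a ≤-sorted list
theorem sorted_run_facts (v : String) (rest : List String)
    (hpw : (v :: rest).Pairwise (· ≤ ·)) :
    v ∉ rest.dropWhile (· == v) ∧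
    (v :: rest).count v = 1 + (rest.takeWhile (· == v)).length ∧
    (∀ w, w ≠ v → (v :: rest).count w = (rest.dropWhile (· == v)).count w) ∧
    (rest.dropWhile (· == v)).Pairwise (· ≤ ·) := by
  have hrest : rest.Pairwise (· ≤ ·) := (List.pairwise_cons.mp hpw).2
  have hd : (rest.dropWhile (· == v)).Pairwise (· ≤ ·) :=
    hrest.sublist (List.dropWhile_suffix _).sublist
  have htv : ∀ x ∈ rest.takeWhile (· == v), x = v := by
    intro x hx
    have hb := List.mem_takeWhile_imp hx
    exact eq_of_beq hb
  have hvle : ∀ x ∈ rest, v ≤ x := (List.pairwise_cons.mp hpw).1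
  have hvd : v ∉ rest.dropWhile (· == v) := by
    intro hv
    cases hdd : rest.dropWhile (· == v) with
    | nil => rw [hdd] at hv; cases hv
    | cons h t =>
      have hne : rest.dropWhile (· == v) ≠ [] := by simp [hdd]
      have hhd : ((rest.dropWhile (· == v)).head hne == v) = false :=
        List.head_dropWhile_not _ hne
      have hhne : h ≠ v := by
        simp only [hdd, List.head_cons] at hhd
        exact ne_of_beq_false hhd
      have hhmem : h ∈ rest := (List.dropWhile_suffix _).subset (by rw [hdd]; exact List.mem_cons_self)
      have h1 : v ≤ h := hvle _ hhmem
      rw [hdd] at hv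
      rcases List.mem_cons.mp hv with hv1 | hv2
      · exact hhne hv1.symm
      · have h2 : h ≤ v := by
          rw [hdd] at hd
          exact (List.pairwise_cons.mp hd).1 v hv2
        exact hhne (le_antisymm h2 h1)
  refine ⟨hvd, ?_, ?_, hd⟩
  · have : rest.count v = (rest.takeWhile (· == v)).count v +
        (rest.dropWhile (· == v)).count v := by
      conv_lhs => rw [← List.takeWhile_append_dropWhile (p := (· == v)) (l := rest)]
      exact List.count_append
    have ht : (rest.takeWhile (· == v)).count v = (rest.takeWhile (· == v)).length :=
      List.count_eq_length.mpr (fun x hx => by rw [htv x hx])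
    have hd0 : (rest.dropWhile (· == v)).count v = 0 := List.count_eq_zero.mpr hvd
    rw [List.count_cons_self, this, ht, hd0]
    omega
  · intro w hw
    have : rest.count w = (rest.takeWhile (· == v)).count w +
        (rest.dropWhile (· == v)).count w := by
      conv_lhs => rw [← List.takeWhile_append_dropWhile (p := (· == v)) (l := rest)]
      exact List.count_append
    have ht0 : (rest.takeWhile (· == v)).count w = 0 := by
      apply List.count_eq_zero.mpr
      intro hwmem
      exact hw (htv w hwmem)
    rw [List.count_cons, this, ht0]
    have hvw : (v == w) = false := beq_eq_false_iff_ne.mpr (fun he => hw he.symm)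
    simp [hvw]

theorem repsS_spec (s : List String) (hpw : s.Pairwise (· ≤ ·)) :
    (∀ w, w ∈ repsS s ↔ w ∈ s ∧ 2 ≤ s.count w) ∧ (repsS s).Nodup ∧
    (hasR2 s = true ↔ ∃ v ∈ s, s.count v = 2) := by
  induction s using repsS.induct with
  | case1 => simp [repsS, hasR2]
  | case2 v rest ih =>
    obtain ⟨hvd, hcv, hcw, hd⟩ := sorted_run_facts v rest hpw
    obtain ⟨ihmem, ihnd, ihr2⟩ := ih hd
    have htv : ∀ x ∈ rest.takeWhile (· == v), x = v := by
      intro x hx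
      have hb := List.mem_takeWhile_imp hx
      exact eq_of_beq hb
    have hsplit : ∀ w, w ∈ v :: rest ↔ w = v ∨ w ∈ rest.dropWhile (· == v) := by
      intro w
      constructor
      · intro hw
        rcases List.mem_cons.mp hw with h | h
        · exact Or.inl h
        · rw [← List.takeWhile_append_dropWhile (p := (· == v)) (l := rest)] at h
          rcases List.mem_append.mp h with h | h
          · exact Or.inl (htv w h)
          · exact Or.inr h
      · rintro (rfl | hw)
        · exact List.mem_cons_self
        · exact List.mem_cons_of_mem _ ((List.dropWhile_suffix _).subset hw)
    refine ⟨?_, ?_, ?_⟩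
    · intro w
      rw [repsS]
      by_cases hwv : w = v
      · subst hwv
        have hwd : w ∉ repsS (rest.dropWhile (· == w)) := by
          intro hc
          exact hvd ((ihmem w).mp hc).1
        simp only [List.mem_append, hwd, or_false]
        constructor
        · intro hmem
          refine ⟨List.mem_cons_self, ?_⟩
          by_cases h : (2:Int) ≤ 1 + ((rest.takeWhile (· == w)).length : Int)
          · rw [hcv]; omega
          · simp [h] at hmem
        · intro ⟨_, hcnt⟩
          rw [hcv] at hcnt
          have : (2:Int) ≤ 1 + ((rest.takeWhile (· == w)).length : Int) := by omega
          simp [this]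
      · have hwcount : (v :: rest).count w = (rest.dropWhile (· == v)).count w := hcw w hwv
        simp only [List.mem_append]
        constructor
        · intro hmem
          rcases hmem with h | h
          · exfalso
            rcases Decidable.em ((2:Int) ≤ 1 + ((rest.takeWhile (· == v)).length : Int)) with h2 | h2
            · simp [h2] at h; exact hwv h
            · simp [h2] at h
          · obtain ⟨hm, hc⟩ := (ihmem w).mp h
            exact ⟨(hsplit w).mpr (Or.inr hm), by omega⟩
        · intro ⟨hmem, hcnt⟩
          right
          apply (ihmem w).mpr
          rcases (hsplit w).mp hmem with h | h
          · exact absurd h hwv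
          · exact ⟨h, by omega⟩
    · rw [repsS]
      rcases Decidable.em ((2:Int) ≤ 1 + ((rest.takeWhile (· == v)).length : Int)) with h2 | h2
      · simp only [h2, if_pos, List.singleton_append, List.nodup_cons]
        refine ⟨fun hc => hvd ((ihmem v).mp hc).1, ihnd⟩
      · simp [h2, ihnd]
    · rw [hasR2]
      simp only [Bool.or_eq_true, ihr2]
      constructor
      · rintro (h | ⟨w, hw, hcw2⟩)
        · refine ⟨v, List.mem_cons_self, ?_⟩
          have : 1 + ((rest.takeWhile (· == v)).length : Int) = 2 := by simpa using h
          omega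
        · have hwv : w ≠ v := fun hh => hvd (hh ▸ hw)
          exact ⟨w, (hsplit w).mpr (Or.inr hw), by rw [hcw w hwv]; exact hcw2⟩
      · rintro ⟨w, hw, hcw2⟩
        by_cases hwv : w = v
        · subst hwv
          left
          rw [hcv] at hcw2
          have : 1 + ((rest.takeWhile (· == w)).length : Int) = 2 := by omega
          simpa using this
        · right
          rcases (hsplit w).mp hw with h | h
          · exact absurd h hwv
          · exact ⟨w, h, by rw [← hcw w hwv]; exact hcw2⟩

-- ===== VERDICT (by name: the statement is the Claim_ definition above) =====
theorem highest_value_in_pair_spec : Claim_equal_highest_value_in_pair := by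
  intro values _ hpre
  unfold Spec_highest_value_in_pair
  obtain ⟨hex, _⟩ := hpre
  have hperm : (PySem.List.sorted values (fun x => x)).Perm values :=
    PySem.List.sorted_perm values (fun x => x) false
  have hpw : (PySem.List.sorted values (fun x => x)).Pairwise (· ≤ ·) :=
    PySem.List.sorted_pairwise values (fun x => x)
  obtain ⟨hmem, hnd, hr2⟩ := repsS_spec _ hpw
  have hex' : ∃ v ∈ PySem.List.sorted values (fun x => x),
      (PySem.List.sorted values (fun x => x)).count v = 2 := by
    obtain ⟨v, hv, hc⟩ := hex
    exact ⟨v, hperm.mem_iff.mpr hv, by rw [hperm.count_eq]; exact hc⟩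
  have hr2' : hasR2 (PySem.List.sorted values (fun x => x)) = true := hr2.mpr hex'
  have hB : highest_value_in_pair_alt values =
      List.foldl mstep 0 (repsS (PySem.List.sorted values (fun x => x))) := by
    simp [highest_value_in_pair_alt, scan_spec, hr2']
  have hA : highest_value_in_pair values = List.foldl mstep 0 (repsA values) :=
    A_eq_fold values (number_of_pairs_ne_zero values hex)
  rw [hA, hB]
  have hperm2 : (repsA values).Perm (repsS (PySem.List.sorted values (fun x => x))) := by
    rw [List.perm_ext_iff_of_nodup (repsA_nodup values) hnd]
    intro w
    rw [mem_repsA, hmem w, hperm.mem_iff, hperm.count_eq]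
  exact @List.Perm.foldl_eq _ _ mstep _ _ ⟨mstep_rcomm⟩ hperm2 0
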